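-- pv_equiv track=rewrite | github.com/cecilia-uu/LeetCode | OA/meta/18_comparison_pattern.py | solution
-- ===== SOURCE A (Python) =====
-- def compare(p, numbers, i):
--     if p == 1:
--         return numbers[i+1] > numbers[i]
--     elif p == 0:
--         return numbers[i+1] == numbers[i]
--     else:
--         return numbers[i+1] < numbers[i]
--
-- def solution(numbers, pattern) -> int:
--     p, n = len(pattern), len(numbers)
--     ans = 0
--
--     for i in range(n-p):
--         match = True
--         for j in range(p):
--             match = compare(pattern[j], numbers, i+j)
--             if match == False:
--                 break
--         if match:
--             ans += 1
--     return ans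
-- ===== SOURCE B (Python) =====
-- def solution(numbers, pattern) -> int:
--     # Exact rolling base-3 window code over the precomputed comparison-sign array:
--     # each window shift updates the code in O(1) instead of re-comparing the window.
--     n, p = len(numbers), len(pattern)
--     if p == 0:
--         return n
--     if n - p <= 0:
--         return 0
--     signs = []
--     for k in range(n - 1):
--         d = numbers[k + 1] - numbers[k]
--         signs.append(2 if d > 0 else (1 if d == 0 else 0))
--     target = 0
--     for x in pattern:
--         target = target * 3 + (2 if x == 1 else (1 if x == 0 else 0))
--     v = 0
--     for d in signs[:p]:
--         v = v * 3 + d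
--     pw = 3 ** (p - 1)
--     ans = 1 if v == target else 0
--     for s in range(1, n - p):
--         v = (v - signs[s - 1] * pw) * 3 + signs[s + p - 1]
--         if v == target:
--             ans += 1
--     return ans
-- ===== Notes on version B (the rewrite author's own statement) =====
-- stated objective: alternative
-- what changed: B precomputes the adjacency comparison-sign array once and counts pattern matches with an exact rolling base-3 window code (O(1) per window shift) instead of A's per-start inner comparison loop with early break.
import Mathlib
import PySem

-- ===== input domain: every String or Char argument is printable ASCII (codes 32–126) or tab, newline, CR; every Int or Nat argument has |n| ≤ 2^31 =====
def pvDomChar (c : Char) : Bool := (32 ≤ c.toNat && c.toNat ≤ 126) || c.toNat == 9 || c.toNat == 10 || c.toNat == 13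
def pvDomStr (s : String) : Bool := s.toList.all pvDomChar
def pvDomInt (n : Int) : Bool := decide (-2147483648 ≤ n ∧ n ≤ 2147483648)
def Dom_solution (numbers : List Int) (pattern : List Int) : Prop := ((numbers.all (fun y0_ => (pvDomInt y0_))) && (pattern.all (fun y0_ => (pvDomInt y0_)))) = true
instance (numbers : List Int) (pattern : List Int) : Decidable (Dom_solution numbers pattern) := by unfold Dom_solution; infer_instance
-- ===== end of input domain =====

-- B precomputes the adjacency comparison-sign array once and counts pattern matches with an exact
-- rolling base-3 window code, instead of A's per-start inner comparison loop; same return value everywhere.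

-- ===== PORT A =====
-- compare(p, numbers, i); indices are always in range at every reachable call, so pyGetD's default never fires
def pvCompare (p : Int) (numbers : List Int) (i : Int) : Bool :=
  if p = 1 then decide (PySem.List.pyGetD numbers (i + 1) 0 > PySem.List.pyGetD numbers i 0)
  else if p = 0 then decide (PySem.List.pyGetD numbers (i + 1) 0 = PySem.List.pyGetD numbers i 0)
  else decide (PySem.List.pyGetD numbers (i + 1) 0 < PySem.List.pyGetD numbers i 0)

-- the inner 'for j in range(p)' with its early break, state = match
def pvInnerA (pattern : List Int) (numbers : List Int) (i : Int) : List Int → Bool → Bool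
  | [], m => m
  | j :: js, _m =>
    let m' := pvCompare (PySem.List.pyGetD pattern j 0) numbers (i + j)
    if m' = false then m' else pvInnerA pattern numbers i js m'

def solution (numbers : List Int) (pattern : List Int) : Int :=
  let p : Int := pattern.length
  let n : Int := numbers.length
  (PySem.List.pyRange 0 (n - p) 1).foldl
    (fun ans i =>
      let m := pvInnerA pattern numbers i (PySem.List.pyRange 0 p 1) true
      if m then ans + 1 else ans) 0

-- ===== PORT B =====
def solution_alt (numbers : List Int) (pattern : List Int) : Int :=
  let n : Int := numbers.length
  let p : Int := pattern.length
  if p = 0 then n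
  else if n - p ≤ 0 then 0
  else
    let signs := (PySem.List.pyRange 0 (n - 1) 1).foldl
      (fun acc k =>
        let d := PySem.List.pyGetD numbers (k + 1) 0 - PySem.List.pyGetD numbers k 0
        acc ++ [if d > 0 then (2 : Int) else if d = 0 then 1 else 0]) []
    let target := pattern.foldl
      (fun t x => t * 3 + (if x = 1 then (2 : Int) else if x = 0 then 1 else 0)) 0
    let v0 := (PySem.List.slice signs none (some p)).foldl (fun v d => v * 3 + d) 0
    let pw : Int := 3 ^ (p - 1).toNat   -- 3 ** (p - 1); p ≥ 1 on this branch
    let st := (PySem.List.pyRange 1 (n - p) 1).foldl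
      (fun (st : Int × Int) s =>
        let v := (st.1 - PySem.List.pyGetD signs (s - 1) 0 * pw) * 3
                   + PySem.List.pyGetD signs (s + p - 1) 0
        (v, if v = target then st.2 + 1 else st.2))
      (v0, if v0 = target then 1 else 0)
    st.2

-- ===== PRECONDITION & SPEC =====
def Spec_solution (numbers : List Int) (pattern : List Int) (out : Int) : Prop := out = solution_alt numbers pattern
instance (numbers : List Int) (pattern : List Int) (out : Int) : Decidable (Spec_solution numbers pattern out) := by unfold Spec_solution; infer_instance

-- ===== CLAIM (what is proved, stated in full; the proofs are below) =====
def Claim_equal_solution : Prop := ∀ (numbers : List Int) (pattern : List Int), Dom_solution numbers pattern → Spec_solution numbers pattern (solution numbers pattern)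

-- ===== LEMMAS AND PROOFS =====

-- sign of numbers[k+1] - numbers[k], encoded as a base-3 digit
def encS (d : Int) : Int := if d > 0 then 2 else if d = 0 then 1 else 0
-- a pattern entry as the digit it has to match (1 ↦ 2, 0 ↦ 1, anything else ↦ 0)
def encP (x : Int) : Int := if x = 1 then 2 else if x = 0 then 1 else 0

-- the adjacency comparison-sign list of numbers
def sgn : List Int → List Int
  | a :: b :: t => encS (b - a) :: sgn (b :: t)
  | _ => []

-- base-3 value of a digit list, leading digit first
def code (l : List Int) : Int := l.foldl (fun a d => a * 3 + d) 0

-- the common mathematical value: matching window starts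
def winCount (numbers : List Int) (pattern : List Int) : ℕ :=
  (List.range (numbers.length - pattern.length)).countP
    (fun i => decide (((sgn numbers).drop i).take pattern.length = pattern.map encP))

theorem sgn_length : ∀ nums : List Int, (sgn nums).length = nums.length - 1 := by
  intro nums
  induction nums with
  | nil => simp [sgn]
  | cons a t ih =>
    cases t with
    | nil => simp [sgn]
    | cons b t' => simp [sgn] at ih ⊢; omega

theorem sgn_getD : ∀ (nums : List Int) (k : ℕ), k + 1 < nums.length →
    (sgn nums).getD k 0 = encS (nums.getD (k + 1) 0 - nums.getD k 0) := by
  intro nums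
  induction nums with
  | nil => intro k h; simp at h
  | cons a t ih =>
    intro k h
    cases t with
    | nil => simp at h
    | cons b t' =>
      cases k with
      | zero => simp [sgn]
      | succ k' =>
        have := ih k' (by simpa using h)
        simpa [sgn] using this

theorem sgn_digit : ∀ (nums : List Int), ∀ x ∈ sgn nums, 0 ≤ x ∧ x ≤ 2 := by
  intro nums
  induction nums with
  | nil => simp [sgn]
  | cons a t ih =>
    cases t with
    | nil => simp [sgn]
    | cons b t' =>
      intro x hx
      simp [sgn] at hx
      rcases hx with h | h
      · subst h; unfold encS; split_ifs <;> omega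
      · exact ih x h

theorem encP_digit (x : Int) : 0 ≤ encP x ∧ encP x ≤ 2 := by
  unfold encP; split_ifs <;> omega

theorem code_append (w : List Int) (d : Int) : code (w ++ [d]) = code w * 3 + d := by
  simp [code, List.foldl_append]

theorem code_acc (l : List Int) : ∀ a : Int,
    l.foldl (fun a d => a * 3 + d) a = a * 3 ^ l.length + code l := by
  induction l with
  | nil => intro a; simp [code]
  | cons d t ih =>
    intro a
    simp only [List.foldl_cons, List.length_cons, code] at *
    rw [ih (a * 3 + d)]
    conv_rhs => rw [ih (0 * 3 + d)]
    ring

theorem code_cons (d : Int) (w : List Int) :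
    code (d :: w) = d * 3 ^ w.length + code w := by
  have := code_acc w d
  simp [code] at this ⊢
  rw [this]

theorem code_bounds (l : List Int) (h : ∀ x ∈ l, 0 ≤ x ∧ x ≤ 2) :
    0 ≤ code l ∧ code l < 3 ^ l.length := by
  induction l with
  | nil => simp [code]
  | cons d t ih =>
    have hd := h d (by simp)
    have ht := ih (fun x hx => h x (by simp [hx]))
    rw [code_cons]
    have h3 : (0:Int) < 3 ^ t.length := by positivity
    constructor
    · nlinarith [hd.1, ht.1]
    · simp only [List.length_cons, pow_succ]
      nlinarith [hd.2, ht.2]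

theorem code_inj : ∀ (w1 w2 : List Int), w1.length = w2.length →
    (∀ x ∈ w1, 0 ≤ x ∧ x ≤ 2) → (∀ x ∈ w2, 0 ≤ x ∧ x ≤ 2) →
    code w1 = code w2 → w1 = w2 := by
  intro w1
  induction w1 with
  | nil => intro w2 hl _ _ _; cases w2 <;> simp_all
  | cons d t ih =>
    intro w2 hl h1 h2 hc
    cases w2 with
    | nil => simp at hl
    | cons e u =>
      have hlen : t.length = u.length := by simpa using hl
      rw [code_cons, code_cons, hlen] at hc
      have bt := code_bounds t (fun x hx => h1 x (by simp [hx]))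
      have bu := code_bounds u (fun x hx => h2 x (by simp [hx]))
      rw [hlen] at bt
      have h3 : (0:Int) < 3 ^ u.length := by positivity
      have hd : d = e := by nlinarith [h1 d (by simp), h2 e (by simp), bt.1, bt.2, bu.1, bu.2]
      subst hd
      have : code t = code u := by omega
      rw [ih u hlen (fun x hx => h1 x (by simp [hx])) (fun x hx => h2 x (by simp [hx])) this]


theorem pyRange_zero_map (b : ℤ) :
    PySem.List.pyRange 0 b 1 = (List.range b.toNat).map Int.ofNat := by
  rw [PySem.List.pyRange_one]
  simp only [sub_zero, zero_add]
  rfl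

theorem innerA_all (pattern numbers : List Int) (i : Int) : ∀ l : List Int,
    pvInnerA pattern numbers i l true
      = l.all (fun j => pvCompare (PySem.List.pyGetD pattern j 0) numbers (i + j)) := by
  intro l
  induction l with
  | nil => rfl
  | cons j js ih =>
    simp only [pvInnerA, List.all_cons]
    cases h : pvCompare (PySem.List.pyGetD pattern j 0) numbers (i + j) with
    | false => simp
    | true => simpa using ih

theorem compare_sgn (nums : List Int) (q : Int) (m : ℕ) (hm : m + 1 < nums.length) :
    (pvCompare q nums (m : ℤ) = true) ↔ (sgn nums).getD m 0 = encP q := by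
  have hc : ((m : ℤ) + 1) = ((m + 1 : ℕ) : ℤ) := by push_cast; ring
  have h1 : PySem.List.pyGetD nums ((m : ℤ) + 1) 0 = nums.getD (m + 1) 0 := by
    rw [hc, PySem.List.pyGetD_natCast]
  have h2 : PySem.List.pyGetD nums (m : ℤ) 0 = nums.getD m 0 := by
    rw [PySem.List.pyGetD_natCast]
  rw [sgn_getD nums m hm]
  unfold pvCompare encP encS
  rw [h1, h2]
  generalize nums.getD (m + 1) 0 = b
  generalize nums.getD m 0 = a
  split_ifs <;> simp <;> omega

theorem take_drop_eq_iff (l pat : List Int) (P k : ℕ) (hP : pat.length = P)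
    (h : k + P ≤ l.length) :
    ((l.drop k).take P = pat)
      ↔ ∀ j < P, l.getD (k + j) 0 = pat.getD j 0 := by
  subst hP
  constructor
  · intro he j hj
    have hkj : k + j < l.length := by omega
    have hD := congrArg (fun w => w.getD j 0) he
    simp only at hD
    rw [List.getD_eq_getElem _ 0 (by simp; omega), List.getElem_take, List.getElem_drop,
        ← List.getD_eq_getElem l 0 hkj] at hD
    rw [List.getD_eq_getElem l 0 hkj, List.getD_eq_getElem pat 0 hj]
    rw [List.getD_eq_getElem l 0 hkj, List.getD_eq_getElem pat 0 hj] at hD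
    exact hD
  · intro hp
    apply List.ext_getElem
    · simp; omega
    · intro j hj hj'
      rw [List.getElem_take, List.getElem_drop]
      have := hp j hj'
      rw [List.getD_eq_getElem l 0 (by omega), List.getD_eq_getElem pat 0 hj'] at this
      exact this

theorem match_iff (numbers pattern : List Int) (k : ℕ)
    (hk : k < numbers.length - pattern.length) :
    pvInnerA pattern numbers (k : ℤ) (PySem.List.pyRange 0 (pattern.length : ℤ) 1) true
      = decide (((sgn numbers).drop k).take pattern.length = pattern.map encP) := by
  rw [innerA_all, pyRange_zero_map, Int.toNat_natCast, List.all_map]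
  have hlen : k + pattern.length ≤ (sgn numbers).length := by
    rw [sgn_length]; omega
  rw [Bool.eq_iff_iff, List.all_eq_true, decide_eq_true_iff]
  rw [take_drop_eq_iff _ _ pattern.length _ (by simp) (by simpa using hlen)]
  have hget : ∀ j : ℕ, j < pattern.length →
      (pattern.map encP).getD j 0 = encP (pattern.getD j 0) := by
    intro j hj
    rw [List.getD_eq_getElem _ 0 (by simpa using hj), List.getElem_map,
        List.getD_eq_getElem pattern 0 hj]
  constructor
  · intro hall j hj
    have := hall j (List.mem_range.mpr hj)
    simp only [Function.comp, Int.ofNat_eq_natCast] at this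
    have hgp : PySem.List.pyGetD pattern (j : ℤ) 0 = pattern.getD j 0 := by
      rw [PySem.List.pyGetD_natCast]
    rw [hgp, show (k : ℤ) + (j : ℤ) = ((k + j : ℕ) : ℤ) from by push_cast; ring] at this
    rw [(compare_sgn numbers (pattern.getD j 0) (k + j) (by omega)).mp this, hget j hj]
  · intro hp j hmem
    have hj : j < pattern.length := List.mem_range.mp hmem
    simp only [Function.comp, Int.ofNat_eq_natCast]
    have hgp : PySem.List.pyGetD pattern (j : ℤ) 0 = pattern.getD j 0 := by
      rw [PySem.List.pyGetD_natCast]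
    rw [hgp, show (k : ℤ) + (j : ℤ) = ((k + j : ℕ) : ℤ) from by push_cast; ring]
    apply (compare_sgn numbers (pattern.getD j 0) (k + j) (by omega)).mpr
    rw [hp j hj, hget j hj]


theorem signs_eq (nums : List Int) :
    (PySem.List.pyRange 0 ((nums.length : ℤ) - 1) 1).foldl
      (fun acc k =>
        let d := PySem.List.pyGetD nums (k + 1) 0 - PySem.List.pyGetD nums k 0
        acc ++ [if d > 0 then (2 : Int) else if d = 0 then 1 else 0]) []
      = sgn nums := by
  show (PySem.List.pyRange 0 ((nums.length : ℤ) - 1) 1).foldl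
      (fun acc k =>
        acc ++ [encS (PySem.List.pyGetD nums (k + 1) 0 - PySem.List.pyGetD nums k 0)]) []
      = sgn nums
  rw [PySem.List.foldl_append_singleton_eq_map, List.nil_append, pyRange_zero_map, List.map_map]
  apply List.ext_getElem
  · simp [sgn_length]
  · intro m hm hm'
    have hm2 : m + 1 < nums.length := by
      simp [sgn_length] at hm'; omega
    simp only [List.getElem_map, List.getElem_range, Function.comp]
    rw [Int.ofNat_eq_natCast, show ((m : ℤ) + 1) = ((m + 1 : ℕ) : ℤ) from by push_cast; ring,
        PySem.List.pyGetD_natCast, PySem.List.pyGetD_natCast,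
        ← List.getD_eq_getElem (sgn nums) 0 hm', sgn_getD nums m hm2]

theorem target_eq (pattern : List Int) :
    pattern.foldl (fun t x => t * 3 + (if x = 1 then (2 : Int) else if x = 0 then 1 else 0)) 0
      = code (pattern.map encP) := by
  rw [code, List.foldl_map]
  rfl

theorem roll (l : List Int) (P s : ℕ) (hP : 1 ≤ P) (hs : 1 ≤ s) (h : s + P ≤ l.length) :
    code ((l.drop s).take P)
      = (code ((l.drop (s - 1)).take P) - l.getD (s - 1) 0 * 3 ^ (P - 1)) * 3
        + l.getD (s + P - 1) 0 := by
  obtain ⟨s', rfl⟩ : ∃ s', s = s' + 1 := ⟨s - 1, by omega⟩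
  obtain ⟨P', rfl⟩ : ∃ P', P = P' + 1 := ⟨P - 1, by omega⟩
  simp only [Nat.add_sub_cancel]
  have hmidlen : ((l.drop (s' + 1)).take P').length = P' := by simp; omega
  have h2 : (l.drop s').take (P' + 1)
      = l[s']'(by omega) :: (l.drop (s' + 1)).take P' := by
    rw [List.drop_eq_getElem_cons (by omega : s' < l.length), List.take_succ_cons]
  have h3 : (l.drop (s' + 1)).take (P' + 1)
      = (l.drop (s' + 1)).take P' ++ [l[s' + 1 + P']'(by omega)] := by
    rw [List.take_add_one]
    congr 1
    rw [List.getElem?_eq_getElem (by simp; omega)]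
    simp [List.getElem_drop]
  rw [h2, h3, code_append, code_cons, hmidlen]
  rw [List.getD_eq_getElem l 0 (by omega : s' < l.length),
      show s' + 1 + (P' + 1) - 1 = s' + 1 + P' from by omega,
      List.getD_eq_getElem l 0 (by omega : s' + 1 + P' < l.length)]
  ring

theorem window_digits (nums : List Int) (P k : ℕ) :
    ∀ x ∈ ((sgn nums).drop k).take P, 0 ≤ x ∧ x ≤ 2 :=
  fun x hx => sgn_digit nums x (List.mem_of_mem_drop (List.mem_of_mem_take hx))

theorem codeW_eq_iff (nums pat : List Int) (k : ℕ)
    (hd : ∀ x ∈ pat, 0 ≤ x ∧ x ≤ 2) (h : k + pat.length ≤ (sgn nums).length) :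
    (code (((sgn nums).drop k).take pat.length) = code pat)
      ↔ ((sgn nums).drop k).take pat.length = pat := by
  constructor
  · intro hc
    exact code_inj _ _ (by simp; omega) (window_digits nums pat.length k) hd hc
  · intro he
    rw [he]

theorem loop_inv (numbers pattern : List Int) (hP : 1 ≤ pattern.length) :
    ∀ (m : ℕ), m ≤ (sgn numbers).length - pattern.length → ∀ c : ℤ,
    (PySem.List.pyRange 1 (1 + (m : ℤ)) 1).foldl
      (fun (st : ℤ × ℤ) s =>
        ((st.1 - PySem.List.pyGetD (sgn numbers) (s - 1) 0 * 3 ^ (pattern.length - 1)) * 3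
           + PySem.List.pyGetD (sgn numbers) (s + (pattern.length : ℤ) - 1) 0,
         if (st.1 - PySem.List.pyGetD (sgn numbers) (s - 1) 0 * 3 ^ (pattern.length - 1)) * 3
              + PySem.List.pyGetD (sgn numbers) (s + (pattern.length : ℤ) - 1) 0
            = code (pattern.map encP)
         then st.2 + 1 else st.2))
      (code ((sgn numbers).take pattern.length), c)
      = (code (((sgn numbers).drop m).take pattern.length),
         c + ((List.range m).countP
              (fun t => decide (((sgn numbers).drop (t + 1)).take pattern.length
                                  = pattern.map encP)) : ℤ)) := by
  intro m
  induction m with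
  | zero =>
    intro _ c
    rw [show ((1 : ℤ) + (0 : ℕ)) = 1 from by norm_num, PySem.List.pyRange_one_eq_nil (by omega)]
    simp
  | succ m ih =>
    intro hm c
    rw [show ((1 : ℤ) + ((m + 1 : ℕ) : ℤ)) = (1 + (m : ℤ)) + 1 from by push_cast; ring,
        PySem.List.pyRange_one_succ_right (by omega : (1 : ℤ) ≤ 1 + (m : ℤ)),
        List.foldl_append, ih (by omega) c]
    simp only [List.foldl_cons, List.foldl_nil]
    have hg1 : PySem.List.pyGetD (sgn numbers) (1 + (m : ℤ) - 1) 0 = (sgn numbers).getD m 0 := by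
      rw [show (1 + (m : ℤ) - 1) = ((m : ℕ) : ℤ) from by ring, PySem.List.pyGetD_natCast]
    have hg2 : PySem.List.pyGetD (sgn numbers) (1 + (m : ℤ) + (pattern.length : ℤ) - 1) 0
        = (sgn numbers).getD (m + pattern.length) 0 := by
      rw [show (1 + (m : ℤ) + (pattern.length : ℤ) - 1) = ((m + pattern.length : ℕ) : ℤ) from by
            push_cast; ring, PySem.List.pyGetD_natCast]
    have hroll := roll (sgn numbers) pattern.length (m + 1) hP (by omega) (by omega)
    rw [show m + 1 - 1 = m from by omega, show m + 1 + pattern.length - 1 = m + pattern.length from by omega] at hroll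
    have hv : (code (((sgn numbers).drop m).take pattern.length)
          - PySem.List.pyGetD (sgn numbers) (1 + (m : ℤ) - 1) 0 * 3 ^ (pattern.length - 1)) * 3
          + PySem.List.pyGetD (sgn numbers) (1 + (m : ℤ) + (pattern.length : ℤ) - 1) 0
        = code (((sgn numbers).drop (m + 1)).take pattern.length) := by
      rw [hg1, hg2, hroll]
    rw [hv]
    have hcnt : ((List.range (m + 1)).countP
          (fun t => decide (((sgn numbers).drop (t + 1)).take pattern.length = pattern.map encP)))
        = (List.range m).countP
            (fun t => decide (((sgn numbers).drop (t + 1)).take pattern.length = pattern.map encP))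
          + (if ((sgn numbers).drop (m + 1)).take pattern.length = pattern.map encP then 1 else 0) := by
      rw [List.range_succ, List.countP_append]
      simp [List.countP_cons]
    have hiff := codeW_eq_iff numbers (pattern.map encP) (m + 1)
      (fun x hx => by
        obtain ⟨y, _, rfl⟩ := List.mem_map.mp hx
        exact encP_digit y)
      (by simp; omega)
    rw [show (pattern.map encP).length = pattern.length from by simp] at hiff
    by_cases hw : ((sgn numbers).drop (m + 1)).take pattern.length = pattern.map encP
    · rw [if_pos (hiff.mpr hw), hcnt, if_pos hw]
      simp only [Prod.mk.injEq, true_and]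
      push_cast
      ring
    · rw [if_neg (fun hc => hw (hiff.mp hc)), hcnt, if_neg hw]
      simp

theorem solution_eq_winCount (numbers pattern : List Int) :
    solution numbers pattern = (winCount numbers pattern : Int) := by
  unfold solution winCount
  simp only []
  rw [PySem.List.foldl_if_add_one, zero_add,
      pyRange_zero_map ((numbers.length : ℤ) - (pattern.length : ℤ)), List.countP_map]
  have ht : ((numbers.length : ℤ) - (pattern.length : ℤ)).toNat
      = numbers.length - pattern.length := by omega
  rw [ht]
  norm_cast
  apply List.countP_congr
  intro k hk
  have hk' : k < numbers.length - pattern.length := List.mem_range.mp hk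
  have : pvInnerA pattern numbers (Int.ofNat k) (PySem.List.pyRange 0 (pattern.length : ℤ) 1) true
      = decide (((sgn numbers).drop k).take pattern.length = pattern.map encP) := by
    rw [Int.ofNat_eq_natCast]
    exact match_iff numbers pattern k hk'
  simp only [Function.comp]
  rw [this]


theorem alt_eq_winCount (numbers pattern : List Int) :
    solution_alt numbers pattern = (winCount numbers pattern : ℤ) := by
  by_cases hp0 : pattern.length = 0
  · have hpat : pattern = [] := List.length_eq_zero_iff.mp hp0
    subst hpat
    simp [solution_alt, winCount]
  · by_cases hnp : numbers.length ≤ pattern.length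
    · simp only [solution_alt]
      rw [if_neg (by exact_mod_cast hp0), if_pos (by omega)]
      unfold winCount
      rw [show numbers.length - pattern.length = 0 from by omega]
      simp
    · simp only [solution_alt]
      rw [if_neg (by exact_mod_cast hp0), if_neg (by omega)]
      rw [signs_eq numbers, target_eq pattern]
      simp only [PySem.List.slice_to_natCast]
      rw [show ((pattern.length : ℤ) - 1).toNat = pattern.length - 1 from by omega]
      simp only [show ∀ l : List ℤ, l.foldl (fun v d => v * 3 + d) 0 = code l from fun l => rfl]
      rw [show ((numbers.length : ℤ) - (pattern.length : ℤ))
            = 1 + ((numbers.length - pattern.length - 1 : ℕ) : ℤ) from by omega]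
      rw [loop_inv numbers pattern (by omega) (numbers.length - pattern.length - 1)
            (by rw [sgn_length]; omega)
            (if code ((sgn numbers).take pattern.length) = code (pattern.map encP) then 1 else 0)]
      simp only []
      unfold winCount
      rw [show numbers.length - pattern.length = (numbers.length - pattern.length - 1) + 1 from by
            omega,
          List.range_succ_eq_map, List.countP_cons, List.countP_map]
      have hiff := codeW_eq_iff numbers (pattern.map encP) 0
        (fun x hx => by
          obtain ⟨y, _, rfl⟩ := List.mem_map.mp hx
          exact encP_digit y)
        (by rw [sgn_length]; simp; omega)
      rw [show (pattern.map encP).length = pattern.length from by simp] at hiff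
      rw [List.drop_zero] at hiff
      have hc : (List.range (numbers.length - pattern.length - 1)).countP
            ((fun i => decide (List.take pattern.length (List.drop i (sgn numbers))
                = List.map encP pattern)) ∘ Nat.succ)
          = (List.range (numbers.length - pattern.length - 1)).countP
            (fun t => decide (List.take pattern.length (List.drop (t + 1) (sgn numbers))
                = List.map encP pattern)) :=
        List.countP_congr (fun t _ => Iff.rfl)
      by_cases h0 : (sgn numbers).take pattern.length = pattern.map encP
      · rw [if_pos (hiff.mpr h0)]
        conv_rhs => rw [hc]
        simp [List.drop_zero, h0]
        ring
      · rw [if_neg (fun hcd => h0 (hiff.mp hcd))]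
        conv_rhs => rw [hc]
        simp [List.drop_zero, h0]
-- ===== VERDICT (by name: the statement is the Claim_ definition above) =====
theorem solution_spec : Claim_equal_solution := by
  intro numbers pattern _
  unfold Spec_solution
  rw [solution_eq_winCount, alt_eq_winCount]
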